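-- pv_equiv track=rewrite | github.com/xrnavigation/map-reproduction-and-navigation-study | map_similarity/pipeline.py | infer_content_map_number
-- ===== SOURCE A (Python) =====
-- from typing import Dict, List, Optional, Sequence, Set, Tuple
--
-- def infer_content_map_number(feature_names: Set[str], signatures: Dict[int, Set[str]]) -> Optional[int]:
--     """Choose the baseline map whose non-grid names best match the participant file."""
--     if not feature_names:
--         return None
--
--     best_map = None
--     best_overlap = 0
--     for map_number, signature in signatures.items():
--         overlap = len(feature_names & signature)
--         if overlap > best_overlap:
--             best_map = map_number
--             best_overlap = overlap
--         elif overlap == best_overlap: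
--             best_map = None
--
--     return best_map if best_overlap > 0 else None
-- ===== SOURCE B (Python) =====
-- def infer_content_map_number(feature_names, signatures):
--     """Table-then-reduce: tabulate all overlaps, then keep the unique positive maximum."""
--     if not feature_names or not signatures:
--         return None
--     overlaps = [(m, len(feature_names & s)) for m, s in signatures.items()]
--     best = max(ov for _, ov in overlaps)
--     if best == 0:
--         return None
--     winners = [m for m, ov in overlaps if ov == best]
--     return winners[0] if len(winners) == 1 else None
-- ===== Notes on version B (the rewrite author's own statement) =====
-- stated objective: alternative
-- what changed: Replaces the streaming argmax-with-tie-flag loop by a table-then-reduce decomposition: build the (map, overlap) table once, take the maximum overlap, and return the map only if exactly one map attains a positive maximum.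
import Mathlib
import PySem

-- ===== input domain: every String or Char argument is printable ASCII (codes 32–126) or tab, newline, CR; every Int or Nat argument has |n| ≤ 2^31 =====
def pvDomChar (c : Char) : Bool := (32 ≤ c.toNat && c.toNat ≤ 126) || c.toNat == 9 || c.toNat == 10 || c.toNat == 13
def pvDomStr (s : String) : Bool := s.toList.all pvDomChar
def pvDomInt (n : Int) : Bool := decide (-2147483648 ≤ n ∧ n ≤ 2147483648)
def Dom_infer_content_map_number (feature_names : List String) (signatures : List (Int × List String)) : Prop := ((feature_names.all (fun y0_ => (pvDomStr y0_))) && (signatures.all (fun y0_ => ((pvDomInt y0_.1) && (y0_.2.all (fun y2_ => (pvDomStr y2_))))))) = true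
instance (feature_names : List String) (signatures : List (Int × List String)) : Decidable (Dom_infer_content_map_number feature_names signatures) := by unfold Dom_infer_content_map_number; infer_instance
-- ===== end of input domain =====

-- B is a table-then-reduce reformulation of A's streaming argmax-with-tie-flag; same cost (objective: alternative).

-- ===== PORT A =====
-- len(feature_names & signature): number of distinct feature names that also occur in the signature (shared helper; both Pythons compute it the same way)
def pvOverlap (fn : List String) (sig : List String) : Int :=
  (((PySem.List.dedup fn).countP (fun x => sig.contains x) : Nat) : Int)

def infer_content_map_number (feature_names : List String) (signatures : List (Int × List String)) : Option Int :=
  if feature_names = [] then none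
  else
    let r := signatures.foldl (fun (s : Option Int × Int) p =>
      let ov := pvOverlap feature_names p.2
      if s.2 < ov then (some p.1, ov)
      else if ov = s.2 then (none, s.2)
      else s) (none, 0)
    if 0 < r.2 then r.1 else none

-- ===== PORT B =====
def infer_content_map_number_alt (feature_names : List String) (signatures : List (Int × List String)) : Option Int :=
  if feature_names = [] ∨ signatures = [] then none
  else
    let overlaps := signatures.map (fun p => (p.1, pvOverlap feature_names p.2))
    match PySem.List.max? (overlaps.map (·.2)) (fun x => x) with
    | none => none
    | some best =>
      if best = 0 then none
      else
        let winners := (overlaps.filter (fun p => p.2 == best)).map (·.1)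
        if winners.length = 1 then winners.head? else none

-- ===== PRECONDITION & SPEC =====
def Spec_infer_content_map_number (feature_names : List String) (signatures : List (Int × List String)) (out : Option Int) : Prop := out = infer_content_map_number_alt feature_names signatures
instance (feature_names : List String) (signatures : List (Int × List String)) (out : Option Int) : Decidable (Spec_infer_content_map_number feature_names signatures out) := by unfold Spec_infer_content_map_number; infer_instance

-- ===== CLAIM (what is proved, stated in full; the proofs are below) =====
def Claim_equal_infer_content_map_number : Prop := ∀ (feature_names : List String) (signatures : List (Int × List String)), Dom_infer_content_map_number feature_names signatures → Spec_infer_content_map_number feature_names signatures (infer_content_map_number feature_names signatures)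

-- ===== LEMMAS AND PROOFS =====

-- A's loop body, over the (key, overlap) pair table
def pvStep (s : Option Int × Int) (p : Int × Int) : Option Int × Int :=
  if s.2 < p.2 then (some p.1, p.2) else if p.2 = s.2 then (none, s.2) else s

def pvMx (q : List (Int × Int)) : Int := q.foldl (fun a p => max a p.2) 0

def pvRes (q : List (Int × Int)) : Option Int :=
  if 0 < pvMx q ∧ ((q.filter (fun p => p.2 == pvMx q)).length = 1)
  then ((q.filter (fun p => p.2 == pvMx q)).map (·.1)).head? else none

theorem pvMx_nonneg (q : List (Int × Int)) : 0 ≤ pvMx q :=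
  (PySem.List.le_foldl_max_int q (fun p => p.2) 0).1

theorem le_pvMx (q : List (Int × Int)) : ∀ p ∈ q, p.2 ≤ pvMx q :=
  (PySem.List.le_foldl_max_int q (fun p => p.2) 0).2

theorem pvMx_append (q : List (Int × Int)) (p : Int × Int) :
    pvMx (q ++ [p]) = max (pvMx q) p.2 := by
  simp [pvMx, List.foldl_append]

theorem pvMx_attain (q : List (Int × Int)) : pvMx q = 0 ∨ ∃ p ∈ q, p.2 = pvMx q := by
  induction q using List.reverseRecOn with
  | nil => left; rfl
  | append_singleton r p ih =>
    rw [pvMx_append]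
    rcases le_or_gt p.2 (pvMx r) with h | h
    · rw [max_eq_left h]
      rcases ih with h0 | ⟨w, hw, he⟩
      · exact Or.inl h0
      · exact Or.inr ⟨w, by simp [hw], he⟩
    · rw [max_eq_right h.le]
      exact Or.inr ⟨p, by simp, rfl⟩

theorem pv_fold_char (q : List (Int × Int)) :
    q.foldl pvStep (none, 0) = (pvRes q, pvMx q) := by
  induction q using List.reverseRecOn with
  | nil => rfl
  | append_singleton r p ih =>
    rw [List.foldl_append, ih, List.foldl_cons, List.foldl_nil]
    rcases lt_trichotomy (pvMx r) p.2 with h | h | h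
    · -- p strictly exceeds the running max: p is the unique attainer of the new max
      have hfil : r.filter (fun x => x.2 == p.2) = [] := by
        rw [List.filter_eq_nil_iff]
        intro x hx
        have := le_pvMx r x hx
        simp only [beq_iff_eq]
        omega
      have hpos : 0 < p.2 := lt_of_le_of_lt (pvMx_nonneg r) h
      have hres : pvRes (r ++ [p]) = some p.1 := by
        simp [pvRes, pvMx_append, max_eq_right h.le, List.filter_append, hfil,
          List.filter_cons, hpos]
      rw [hres, pvMx_append, max_eq_right h.le]
      simp [pvStep, h]
    · -- tie with the running max: result resets to none
      have hMx : pvMx (r ++ [p]) = pvMx r := by rw [pvMx_append, h, max_self]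
      have hres : pvRes (r ++ [p]) = none := by
        by_cases h0 : 0 < pvMx r
        · rcases pvMx_attain r with hz | ⟨w, hw, he⟩
          · omega
          · have hmem : w ∈ r.filter (fun x => x.2 == pvMx r) :=
              List.mem_filter.2 ⟨hw, by simp [he]⟩
            have h1 : 0 < (r.filter (fun x => x.2 == pvMx r)).length :=
              List.length_pos_of_mem hmem
            have hlen : ((r ++ [p]).filter (fun x => x.2 == pvMx (r ++ [p]))).length ≠ 1 := by
              rw [hMx, List.filter_append, List.length_append]
              have h2 : ([p].filter (fun x => x.2 == pvMx r)).length = 1 := by simp [← h]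
              omega
            simp only [pvRes]
            rw [if_neg (fun hc => hlen hc.2)]
        · have hz : pvMx r = 0 := le_antisymm (by omega) (pvMx_nonneg r)
          simp [pvRes, hMx, hz]
      rw [hres, hMx]
      simp [pvStep, h]
    · -- p below the running max: nothing changes
      have hMx : pvMx (r ++ [p]) = pvMx r := by rw [pvMx_append, max_eq_left h.le]
      have hne : ¬ (p.2 = pvMx r) := by omega
      have hfil : (r ++ [p]).filter (fun x => x.2 == pvMx r)
          = r.filter (fun x => x.2 == pvMx r) := by
        rw [List.filter_append]
        simp [List.filter_cons, hne]
      have hres : pvRes (r ++ [p]) = pvRes r := by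
        simp only [pvRes, hMx, hfil]
      rw [hres, hMx]
      simp [pvStep, hne, (show ¬ pvMx r < p.2 by omega)]

-- the fold in port A is pvStep over the pair table
theorem pv_foldA (fn : List String) (sigs : List (Int × List String)) :
    sigs.foldl (fun (s : Option Int × Int) p =>
      let ov := pvOverlap fn p.2
      if s.2 < ov then (some p.1, ov)
      else if ov = s.2 then (none, s.2)
      else s) (none, 0)
    = (sigs.map (fun p => (p.1, pvOverlap fn p.2))).foldl pvStep (none, 0) := by
  rw [List.foldl_map]; rfl

theorem pv_max_eq_pvMx (x : Int × Int) (t : List (Int × Int)) (hx : 0 ≤ x.2) :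
    PySem.List.max? (((x :: t).map (·.2))) (fun y => y) = some (pvMx (x :: t)) := by
  rw [List.map_cons, PySem.List.max?_id_cons]
  congr 1
  rw [List.foldl_map]
  simp [pvMx, max_eq_right hx]

-- ===== VERDICT (by name: the statement is the Claim_ definition above) =====
theorem infer_content_map_number_spec : Claim_equal_infer_content_map_number := by
  intro fn sigs _
  show infer_content_map_number fn sigs = infer_content_map_number_alt fn sigs
  by_cases hfn : fn = []
  · simp [infer_content_map_number, infer_content_map_number_alt, hfn]
  · cases sigs with
    | nil => simp [infer_content_map_number, infer_content_map_number_alt, hfn]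
    | cons s0 st =>
      set q : List (Int × Int) := ((s0 :: st).map (fun p => (p.1, pvOverlap fn p.2))) with hq
      obtain ⟨x, t, hxt⟩ : ∃ x t, q = x :: t := ⟨_, _, rfl⟩
      have hnn : ∀ p ∈ q, 0 ≤ p.2 := by
        intro p hp
        rw [hq] at hp
        obtain ⟨y, -, rfl⟩ := List.mem_map.1 hp
        exact Int.natCast_nonneg _
      have hmax : PySem.List.max? (q.map (·.2)) (fun y => y) = some (pvMx q) := by
        rw [hxt]
        exact pv_max_eq_pvMx x t (by rw [hxt] at hnn; exact hnn x (by simp))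
      have hA : infer_content_map_number fn (s0 :: st)
          = if 0 < pvMx q then pvRes q else none := by
        simp only [infer_content_map_number, if_neg hfn]
        rw [pv_foldA, ← hq, pv_fold_char]
      have hB : infer_content_map_number_alt fn (s0 :: st)
          = if pvMx q = 0 then none
            else if ((q.filter (fun p => p.2 == pvMx q)).map (·.1)).length = 1
                 then ((q.filter (fun p => p.2 == pvMx q)).map (·.1)).head? else none := by
        simp only [infer_content_map_number_alt]
        rw [← hq, hmax, if_neg (by simp [hfn])]
      rw [hA, hB]
      by_cases h0 : pvMx q = 0
      · simp [pvRes, h0]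
      · have hpos : 0 < pvMx q := lt_of_le_of_ne (pvMx_nonneg q) (Ne.symm h0)
        rw [if_pos hpos, if_neg h0]
        simp only [pvRes, List.length_map]
        by_cases h1 : (q.filter (fun p => p.2 == pvMx q)).length = 1
        · rw [if_pos ⟨hpos, h1⟩, if_pos h1]
        · rw [if_neg (by tauto), if_neg h1]
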